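-- pv_equiv track=rewrite | github.com/JuanLozanoFrias/mi_aplicacion_python | logic/tableros/export_step4.py | _collect_totales
-- ===== SOURCE A (Python) =====
-- from typing import Dict, List, Tuple
--
-- def _collect_totales(rows: List[List[str]], marca_default: str = "") -> List[List[str]]:
--     """
--     Suma por CÓDIGO. Entrada: filas con columnas ya normalizadas:
--     [ITEM, CÓDIGO, MODELO, NOMBRE, DESCRIPCIÓN, MARCA, ICC240, ICC480, REF, TORQUE]
--     """
--     agg: Dict[str, Dict[str, object]] = {}
--
--     def add_row(row: List[str]) -> None:
--         if len(row) < 2: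
--             return
--         code = (row[1] or "").strip()
--         if not code:
--             return
--         if code not in agg:
--             agg[code] = {
--                 "codigo": code,
--                 "modelo": row[2] if len(row) > 2 else "",
--                 "nombre": row[3] if len(row) > 3 else "",
--                 "descripcion": row[4] if len(row) > 4 else "",
--                 "marca": row[5] if len(row) > 5 else marca_default,
--                 "icc240": row[6] if len(row) > 6 else "",
--                 "icc480": row[7] if len(row) > 7 else "",
--                 "ref": row[8] if len(row) > 8 else "",
--                 "torque": row[9] if len(row) > 9 else "",
--                 "cantidad": 0,
--             }
--         agg[code]["cantidad"] = int(agg[code]["cantidad"]) + 1  # type: ignore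
--
--     for r in (rows or []):
--         add_row(r)
--
--     # orden por código
--     ordered = sorted(agg.values(), key=lambda d: str(d["codigo"]))
--     out: List[List[str]] = []
--     for d in ordered:
--         out.append([
--             d["codigo"], d["modelo"], d["nombre"], d["descripcion"],
--             d.get("marca", marca_default),
--             d["icc240"], d["icc480"], d["ref"], d["torque"],
--             str(d["cantidad"]),
--         ])
--     return out
-- ===== SOURCE B (Python) =====
-- from typing import List
--
--
-- def _collect_totales(rows: List[List[str]], marca_default: str = "") -> List[List[str]]:
--     # Sum per CODE: filter usable rows once, then walk the sorted set of distinct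
--     # codes, taking each code's first row as representative and counting matches.
--     filtered = []
--     for r in (rows or []):
--         if len(r) >= 2:
--             code = (r[1] or "").strip()
--             if code:
--                 filtered.append((code, r))
--
--     out: List[List[str]] = []
--     for code in sorted({c for c, _ in filtered}):
--         rep = next(r for c, r in filtered if c == code)
--         cnt = sum(1 for c, _ in filtered if c == code)
--
--         def f(k: int, dflt: str = "") -> str:
--             return rep[k] if len(rep) > k else dflt
--
--         out.append([code, f(2), f(3), f(4), f(5, marca_default),
--                     f(6), f(7), f(8), f(9), str(cnt)])
--     return out
-- ===== Notes on version B (the rewrite author's own statement) =====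
-- stated objective: alternative
-- what changed: Replaces the incremental dict-of-records aggregation (insert-if-absent + counter bump, then sort the dict values by code) with a single pre-filter pass followed by iterating the sorted set of distinct codes, recomputing each code's first representative row and its count by direct scans of the filtered list.
import Mathlib
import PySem

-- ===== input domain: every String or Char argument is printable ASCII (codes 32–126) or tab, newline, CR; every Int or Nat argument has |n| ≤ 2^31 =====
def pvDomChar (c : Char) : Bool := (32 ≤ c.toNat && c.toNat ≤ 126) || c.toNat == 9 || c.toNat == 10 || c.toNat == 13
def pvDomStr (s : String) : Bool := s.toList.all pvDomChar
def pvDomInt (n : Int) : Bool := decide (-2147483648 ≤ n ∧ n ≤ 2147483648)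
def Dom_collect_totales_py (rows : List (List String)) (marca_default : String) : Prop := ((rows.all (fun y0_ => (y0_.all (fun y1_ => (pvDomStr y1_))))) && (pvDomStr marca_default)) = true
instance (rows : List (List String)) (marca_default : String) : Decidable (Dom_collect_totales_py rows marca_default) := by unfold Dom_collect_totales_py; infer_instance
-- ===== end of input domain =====

-- B replaces A's incremental dict aggregation by a pre-filter plus per-code scans over
-- the sorted set of distinct codes (objective: alternative; same results).

-- ===== PORT A =====
structure PVEntry where
  codigo : String
  modelo : String
  nombre : String
  descripcion : String
  marca : String
  icc240 : String
  icc480 : String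
  ref : String
  torque : String
  cantidad : Int
deriving DecidableEq, Repr

-- the dict value first stored for a fresh code (cantidad = 0), field by field as in A
def pvInit (marca_default : String) (code : String) (row : List String) : PVEntry :=
  { codigo := code
  , modelo := if 2 < row.length then row.getD 2 "" else ""
  , nombre := if 3 < row.length then row.getD 3 "" else ""
  , descripcion := if 4 < row.length then row.getD 4 "" else ""
  , marca := if 5 < row.length then row.getD 5 "" else marca_default
  , icc240 := if 6 < row.length then row.getD 6 "" else ""
  , icc480 := if 7 < row.length then row.getD 7 "" else ""
  , ref := if 8 < row.length then row.getD 8 "" else ""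
  , torque := if 9 < row.length then row.getD 9 "" else ""
  , cantidad := 0 }

-- add_row: guards, insert-if-absent, then agg[code]["cantidad"] += 1 (key present ⇒ Dict.modify)
def pvAddRow (marca_default : String) (d : PySem.Dict String PVEntry) (row : List String) :
    PySem.Dict String PVEntry :=
  if row.length < 2 then d
  else
    -- code = (row[1] or "").strip(); row[1] is in range since len(row) ≥ 2,
    -- and `s or ""` is s itself for a string, so the `or` drops out
    let code := PySem.Str.strip (row.getD 1 "")
    if code = "" then d
    else
      let d1 := if d.contains code then d else d.insert code (pvInit marca_default code row)
      d1.modify code (pvInit marca_default code row)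
        (fun e => { e with cantidad := e.cantidad + 1 })

def collect_totales_py (rows : List (List String)) (marca_default : String) : List (List String) :=
  let agg := rows.foldl (pvAddRow marca_default) PySem.Dict.empty
  let ordered := PySem.List.sorted agg.values (fun e => e.codigo) false
  ordered.map (fun e =>
    [e.codigo, e.modelo, e.nombre, e.descripcion, e.marca,
     e.icc240, e.icc480, e.ref, e.torque, PySem.Int.toStr e.cantidad])

-- ===== PORT B =====
-- the pre-filter: keep rows with ≥ 2 columns and a nonempty stripped code, paired with it
def pvPick (row : List String) : Option (String × List String) :=
  if 2 ≤ row.length then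
    let code := PySem.Str.strip (row.getD 1 "")
    if code = "" then none else some (code, row)
  else none

-- rep[k] if len(rep) > k else dflt
def pvField (rep : List String) (k : Nat) (dflt : String) : String :=
  if k < rep.length then rep.getD k "" else dflt

def pvOutRow (marca_default code : String) (rep : List String) (cnt : Int) : List String :=
  [code, pvField rep 2 "", pvField rep 3 "", pvField rep 4 "", pvField rep 5 marca_default,
   pvField rep 6 "", pvField rep 7 "", pvField rep 8 "", pvField rep 9 "", PySem.Int.toStr cnt]

def collect_totales_py_alt (rows : List (List String)) (marca_default : String) :
    List (List String) :=
  let filtered := rows.filterMap pvPick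
  let codes := PySem.List.sorted (PySem.Set.ofList (filtered.map Prod.fst)) (fun c => c) false
  codes.map (fun code =>
    let rep := ((filtered.find? (fun p => p.1 == code)).map Prod.snd).getD []
    let cnt : Int := filtered.countP (fun p => p.1 == code)
    pvOutRow marca_default code rep cnt)

-- ===== PRECONDITION & SPEC =====
def Spec_collect_totales_py (rows : List (List String)) (marca_default : String) (out : List (List String)) : Prop := out = collect_totales_py_alt rows marca_default
instance (rows : List (List String)) (marca_default : String) (out : List (List String)) : Decidable (Spec_collect_totales_py rows marca_default out) := by unfold Spec_collect_totales_py; infer_instance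

-- ===== CLAIM (what is proved, stated in full; the proofs are below) =====
def Claim_equal_collect_totales_py : Prop := ∀ (rows : List (List String)) (marca_default : String), Dom_collect_totales_py rows marca_default → Spec_collect_totales_py rows marca_default (collect_totales_py rows marca_default)

-- ===== LEMMAS AND PROOFS =====

-- the aggregated entry B recomputes for a code (find? is some whenever the code occurs)
def pvEntryOf (marca_default : String) (F : List (String × List String)) (c : String) : PVEntry :=
  { pvInit marca_default c (((F.find? (fun p => p.1 == c)).map Prod.snd).getD []) with
    cantidad := (F.countP (fun p => p.1 == c) : Int) }

theorem pvAddRow_pick_none (md : String) (d : PySem.Dict String PVEntry) (row : List String)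
    (h : pvPick row = none) : pvAddRow md d row = d := by
  unfold pvAddRow
  by_cases h1 : row.length < 2
  · rw [if_pos h1]
  · rw [if_neg h1]
    show (if PySem.Str.strip (row.getD 1 "") = "" then d else _) = d
    by_cases h2 : PySem.Str.strip (row.getD 1 "") = ""
    · rw [if_pos h2]
    · exfalso
      unfold pvPick at h
      rw [if_pos (by omega : 2 ≤ row.length)] at h
      replace h : (if PySem.Str.strip (row.getD 1 "") = "" then (none : Option (String × List String))
          else some (PySem.Str.strip (row.getD 1 ""), row)) = none := h
      rw [if_neg h2] at h
      exact Option.some_ne_none _ h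

theorem pvPick_eq_some (row : List String) (q : String × List String)
    (h : pvPick row = some q) :
    2 ≤ row.length ∧ q.1 = PySem.Str.strip (row.getD 1 "") ∧ q.2 = row ∧ q.1 ≠ "" := by
  unfold pvPick at h
  by_cases h1 : 2 ≤ row.length
  · rw [if_pos h1] at h
    by_cases h2 : PySem.Str.strip (row.getD 1 "") = ""
    · replace h : (if PySem.Str.strip (row.getD 1 "") = "" then (none : Option (String × List String))
          else some (PySem.Str.strip (row.getD 1 ""), row)) = some q := h
      rw [if_pos h2] at h
      exact absurd h (by simp)
    · replace h : (if PySem.Str.strip (row.getD 1 "") = "" then (none : Option (String × List String))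
          else some (PySem.Str.strip (row.getD 1 ""), row)) = some q := h
      rw [if_neg h2] at h
      cases h
      exact ⟨h1, rfl, rfl, h2⟩
  · rw [if_neg h1] at h
    exact absurd h (by simp)

theorem pvAddRow_eq (md : String) (d : PySem.Dict String PVEntry) (row : List String)
    (hlen : ¬ row.length < 2) (hne : ¬ PySem.Str.strip (row.getD 1 "") = "") :
    pvAddRow md d row =
      (if d.contains (PySem.Str.strip (row.getD 1 "")) then d
       else d.insert (PySem.Str.strip (row.getD 1 ""))
          (pvInit md (PySem.Str.strip (row.getD 1 "")) row)).modify
        (PySem.Str.strip (row.getD 1 "")) (pvInit md (PySem.Str.strip (row.getD 1 "")) row)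
        (fun e => { e with cantidad := e.cantidad + 1 }) := by
  unfold pvAddRow
  rw [if_neg hlen]
  show (if PySem.Str.strip (row.getD 1 "") = "" then d else _) = _
  rw [if_neg hne]

theorem pvAgg_get? (md : String) (l : List (List String)) : ∀ (c : String),
    (l.foldl (pvAddRow md) PySem.Dict.empty).get? c =
      ((l.filterMap pvPick).find? (fun p => p.1 == c)).map (fun p =>
        { pvInit md c p.2 with
          cantidad := ((l.filterMap pvPick).countP (fun p => p.1 == c) : Int) }) := by
  induction l using List.reverseRecOn with
  | nil => intro c; simp [PySem.Dict.get?_empty]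
  | append_singleton l r ih =>
    intro c
    rw [List.foldl_append, List.foldl_cons, List.foldl_nil, List.filterMap_append]
    cases hp : pvPick r with
    | none =>
      rw [pvAddRow_pick_none md _ r hp]
      simp only [List.filterMap_cons, List.filterMap_nil, hp, List.append_nil]
      exact ih c
    | some q =>
      obtain ⟨hlen, hq1, hq2, hne⟩ := pvPick_eq_some r q hp
      have hfm1 : List.filterMap pvPick [r] = [(PySem.Str.strip (r.getD 1 ""), r)] := by
        simp only [List.filterMap_cons, List.filterMap_nil, hp]
        rw [show q = (PySem.Str.strip (r.getD 1 ""), r) from by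
          rw [← hq1, ← hq2]]
      rw [hfm1, pvAddRow_eq md _ r (by omega) (hq1 ▸ hne)]
      set S := PySem.Str.strip (r.getD 1 "") with hS
      set D := l.foldl (pvAddRow md) PySem.Dict.empty with hD
      set Fl := l.filterMap pvPick with hFl
      simp only [PySem.Dict.modify]
      by_cases hcon : D.contains S = true
      · -- code already seen: the dict entry's count is bumped in place
        rw [if_pos hcon]
        have hisS : (Fl.find? (fun p => p.1 == S)).isSome := by
          rw [PySem.Dict.contains_eq_isSome_get?, ih S] at hcon
          simpa using hcon
        obtain ⟨p, hfind⟩ := Option.isSome_iff_exists.mp hisS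
        have hgd : D.getD S (pvInit md S r) =
            { pvInit md S p.2 with
              cantidad := ((Fl.countP (fun p => p.1 == S)) : Int) } := by
          unfold PySem.Dict.getD
          rw [ih S, hfind]
          rfl
        rw [hgd, PySem.Dict.get?_insert]
        by_cases hcS : c = S
        · subst hcS
          rw [if_pos rfl, List.find?_append, hfind, Option.some_or]
          rw [List.countP_append]
          simp
        · rw [if_neg hcS, ih c, List.find?_append, List.countP_append]
          have hone : ((S, r).1 == c) = false := by
            simp only [beq_eq_false_iff_ne, ne_eq]
            exact fun h => hcS h.symm
          have : List.find? (fun p => p.1 == c) [(S, r)] = none := by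
            simp [hone]
          rw [this, Option.or_none]
          have : List.countP (fun p => p.1 == c) [(S, r)] = 0 := by
            simp [hone]
          rw [this, Nat.add_zero]
      · -- fresh code: it is inserted with count 0 and bumped to 1
        rw [if_neg hcon]
        have hnone : Fl.find? (fun p => p.1 == S) = none := by
          have := ih S
          rw [PySem.Dict.contains_eq_isSome_get?] at hcon
          rcases hfe : Fl.find? (fun p => p.1 == S) with _ | p
          · exact hfe
          · exfalso
            rw [this, hfe] at hcon
            simp at hcon
        have hcnt0 : Fl.countP (fun p => p.1 == S) = 0 := by
          rw [List.countP_eq_zero]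
          exact fun a ha => (List.find?_eq_none.mp hnone) a ha
        have hgd : (D.insert S (pvInit md S r)).getD S (pvInit md S r) = pvInit md S r := by
          unfold PySem.Dict.getD
          rw [PySem.Dict.get?_insert_self]
          rfl
        rw [hgd, PySem.Dict.insert_insert_self, PySem.Dict.get?_insert]
        by_cases hcS : c = S
        · subst hcS
          rw [if_pos rfl, List.find?_append, hnone, Option.none_or]
          rw [List.countP_append, hcnt0]
          simp [pvInit]
        · rw [if_neg hcS, ih c, List.find?_append, List.countP_append]
          have hone : ((S, r).1 == c) = false := by
            simp only [beq_eq_false_iff_ne, ne_eq]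
            exact fun h => hcS h.symm
          have h2 : List.find? (fun p => p.1 == c) [(S, r)] = none := by
            simp [hone]
          rw [h2, Option.or_none]
          have h3 : List.countP (fun p => p.1 == c) [(S, r)] = 0 := by
            simp [hone]
          rw [h3, Nat.add_zero]

theorem pvSet_ofList_concat {xs : List String} {y : String} :
    PySem.Set.ofList (xs ++ [y]) = (PySem.Set.ofList xs).add y := by
  rw [PySem.Set.ofList_eq_foldl, List.foldl_append, List.foldl_cons, List.foldl_nil,
    ← PySem.Set.ofList_eq_foldl]

theorem pvAgg_keys (md : String) (l : List (List String)) :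
    (l.foldl (pvAddRow md) PySem.Dict.empty).keys =
      PySem.Set.ofList ((l.filterMap pvPick).map Prod.fst) := by
  induction l using List.reverseRecOn with
  | nil => simp [PySem.Dict.keys_empty, PySem.Set.ofList_eq_foldl]
  | append_singleton l r ih =>
    rw [List.foldl_append, List.foldl_cons, List.foldl_nil, List.filterMap_append]
    cases hp : pvPick r with
    | none =>
      rw [pvAddRow_pick_none md _ r hp]
      simp only [List.filterMap_cons, List.filterMap_nil, hp, List.append_nil]
      exact ih
    | some q =>
      obtain ⟨hlen, hq1, hq2, hne⟩ := pvPick_eq_some r q hp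
      have hfm1 : List.filterMap pvPick [r] = [(PySem.Str.strip (r.getD 1 ""), r)] := by
        simp only [List.filterMap_cons, List.filterMap_nil, hp]
        rw [show q = (PySem.Str.strip (r.getD 1 ""), r) from by rw [← hq1, ← hq2]]
      rw [hfm1, pvAddRow_eq md _ r (by omega) (hq1 ▸ hne)]
      set S := PySem.Str.strip (r.getD 1 "") with hS
      set D := l.foldl (pvAddRow md) PySem.Dict.empty with hD
      set Fl := l.filterMap pvPick with hFl
      rw [List.map_append]
      show _ = PySem.Set.ofList (Fl.map Prod.fst ++ [S])
      rw [pvSet_ofList_concat]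
      simp only [PySem.Dict.modify]
      by_cases hcon : D.contains S = true
      · rw [if_pos hcon]
        rw [PySem.Dict.keys_insert_of_contains D _ hcon, ih]
        have hmem : S ∈ PySem.Set.ofList (Fl.map Prod.fst) := by
          rw [← ih, ← List.mem_dedup]
          have := (PySem.Dict.contains_eq_decide_mem_keys D S) ▸ hcon
          simpa [ih] using this
        unfold PySem.Set.add
        rw [if_pos (by simpa using hmem)]
      · rw [if_neg hcon]
        have hcon' : D.contains S = false := by
          cases h : D.contains S
          · rfl
          · exact absurd h hcon
        have hk1 : (D.insert S (pvInit md S r)).keys = D.keys ++ [S] :=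
          PySem.Dict.keys_insert_of_not_contains D _ hcon'
        have hc2 : (D.insert S (pvInit md S r)).contains S = true :=
          PySem.Dict.contains_insert_self D S _
        rw [PySem.Dict.keys_insert_of_contains _ _ hc2, hk1, ih]
        have hnotmem : S ∉ PySem.Set.ofList (Fl.map Prod.fst) := by
          rw [← ih]
          intro hmem
          rw [PySem.Dict.contains_eq_decide_mem_keys] at hcon'
          simp [hmem] at hcon'
        unfold PySem.Set.add
        rw [if_neg (by simpa using hnotmem)]

-- ===== VERDICT (by name: the statement is the Claim_ definition above) =====
theorem collect_totales_py_spec : Claim_equal_collect_totales_py := by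
  intro rows md _hdom
  unfold Spec_collect_totales_py collect_totales_py collect_totales_py_alt
  set F := rows.filterMap pvPick with hF
  set D := rows.foldl (pvAddRow md) PySem.Dict.empty with hD
  show (PySem.List.sorted D.values (fun e => e.codigo) false).map
      (fun e => [e.codigo, e.modelo, e.nombre, e.descripcion, e.marca,
        e.icc240, e.icc480, e.ref, e.torque, PySem.Int.toStr e.cantidad]) =
    (PySem.List.sorted (PySem.Set.ofList (F.map Prod.fst)) (fun c => c) false).map
      (fun code => pvOutRow md code (((F.find? (fun p => p.1 == code)).map Prod.snd).getD [])
        (F.countP (fun p => p.1 == code) : Int))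
  have hkeys : D.keys = PySem.Set.ofList (F.map Prod.fst) := pvAgg_keys md rows
  have hnd : D.keys.Nodup := by rw [hkeys]; exact PySem.Set.nodup_ofList _
  have hvals : D.values = D.keys.map (fun k => D.getD k (pvInit md "" [])) :=
    PySem.Dict.values_eq_map_keys D hnd _
  have hmap : D.keys.map (fun k => D.getD k (pvInit md "" [])) = D.keys.map (pvEntryOf md F) := by
    apply List.map_congr_left
    intro k hk
    have hkmem : k ∈ F.map Prod.fst := by
      rw [hkeys] at hk
      exact (PySem.Set.mem_ofList _ _).mp hk
    obtain ⟨p, hpmem, hpk⟩ := List.mem_map.mp hkmem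
    have hisS : (F.find? (fun p => p.1 == k)).isSome := by
      rw [List.find?_isSome]
      exact ⟨p, hpmem, by simp [hpk]⟩
    obtain ⟨p', hfind⟩ := Option.isSome_iff_exists.mp hisS
    unfold PySem.Dict.getD
    rw [pvAgg_get? md rows k, hfind]
    unfold pvEntryOf
    rw [hfind]
    rfl
  have hcod : ∀ c, (pvEntryOf md F c).codigo = c := fun c => rfl
  have hsorted : PySem.List.sorted (D.keys.map (pvEntryOf md F)) (fun e => e.codigo) false =
      (PySem.List.sorted (PySem.Set.ofList (F.map Prod.fst)) (fun c => c) false).map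
        (pvEntryOf md F) := by
    apply PySem.List.sorted_eq_of_perm_of_pairwise_lt
    · exact ((PySem.List.sorted_perm _ _ _).map _).trans (by rw [hkeys])
    · rw [List.pairwise_map]
      have := PySem.List.sorted_ofList_pairwise_lt (F.map Prod.fst)
      exact this.imp (fun h => by simpa [hcod] using h)
  rw [hvals, hmap, hsorted, List.map_map]
  apply List.map_congr_left
  intro c _hc
  simp only [Function.comp_apply]
  unfold pvEntryOf pvOutRow pvField pvInit
  rfl
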